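-- pv_equiv track=rewrite | github.com/igabrilo/WEB_Trilogy | izvorni_kod/backend/src/utils.py | is_faculty_email
-- ===== SOURCE A (Python) =====
-- FACULTY_DOMAINS = [
--     'fer.hr',           # Fakultet elektrotehnike i računarstva
--     'unizg.hr',         # Sveučilište u Zagrebu
--     'ffzg.hr',          # Filozofski fakultet
--     'efzg.hr',          # Ekonomski fakultet
--     'pmf.hr',           # Prirodoslovno-matematički fakultet
--     'agr.hr',           # Agronomski fakultet
--     'fzg.unizg.hr',     # Farmaceutsko-biokemijski fakultet
--     'vet.hr',           # Veterinarski fakultet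
--     'grad.hr',          # Građevinski fakultet
--     'arhitekt.hr',      # Arhitektonski fakultet
--     'fizika.hr',        # Fizički fakultet
--     'kemija.pmf.hr',    # Kemijski fakultet
--     'geof.pmf.hr',      # Geofizički fakultet
--     'geol.pmf.hr',      # Geološki fakultet
--     'matf.hr',          # Matematički fakultet
--     'fpz.hr',           # Fakultet prometnih znanosti
--     'fsb.hr',           # Fakultet strojarstva i brodogradnje
--     'fsreb.hr',         # Fakultet šumarstva i drvne tehnologije
--     'rgn.hr',           # Rudarsko-geološko-naftni fakultet
--     'ktk.hr',           # Kineziološki fakultet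
--     'pfst.hr',          # Prehrambeno-biotehnološki fakultet
--     'ttf.hr',           # Tekstilno-tehnološki fakultet
--     'uni-osijek.hr',    # Sveučilište Josipa Jurja Strossmayera
--     'unist.hr',         # Sveučilište u Splitu
--     'uniri.hr',         # Sveučilište u Rijeci
--     'unidu.hr',         # Sveučilište u Dubrovniku
--     'unizd.hr',         # Sveučilište u Zadru
--     'unipu.hr',         # Sveučilište Jurja Dobrile u Puli
-- ]
--
-- def is_faculty_email(email):
--     """
--     Check if an email belongs to a faculty/university domain
--
--     Args:
--         email (str): Email address to check
--
--     Returns: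
--         bool: True if email is from a faculty domain, False otherwise
--     """
--     if not email or '@' not in email:
--         return False
--
--     domain = email.lower().split('@')[1]
--
--     # Check exact match or subdomain match
--     for faculty_domain in FACULTY_DOMAINS:
--         if domain == faculty_domain or domain.endswith('.' + faculty_domain):
--             return True
--
--     return False
-- ===== SOURCE B (Python) =====
-- FACULTY_SET = frozenset([
--     'fer.hr', 'unizg.hr', 'ffzg.hr', 'efzg.hr', 'pmf.hr', 'agr.hr',
--     'fzg.unizg.hr', 'vet.hr', 'grad.hr', 'arhitekt.hr', 'fizika.hr',
--     'kemija.pmf.hr', 'geof.pmf.hr', 'geol.pmf.hr', 'matf.hr', 'fpz.hr',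
--     'fsb.hr', 'fsreb.hr', 'rgn.hr', 'ktk.hr', 'pfst.hr', 'ttf.hr',
--     'uni-osijek.hr', 'unist.hr', 'uniri.hr', 'unidu.hr', 'unizd.hr',
--     'unipu.hr',
-- ])
--
-- def is_faculty_email(email):
--     if not email or '@' not in email:
--         return False
--     domain = email.lower().split('@')[1]
--     # walk the domain's own dot-suffixes instead of scanning the faculty list
--     while domain:
--         if domain in FACULTY_SET:
--             return True
--         _, _, domain = domain.partition('.')
--     return False
-- ===== Notes on version B (the rewrite author's own statement) =====
-- stated objective: alternative
-- what changed: Instead of scanning all 28 faculty domains with an equality-or-endswith test, B walks the email domain's own dot-suffixes (stripping one leading label per step via partition) and checks each against a precomputed set, returning on the first hit.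
import Mathlib
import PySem

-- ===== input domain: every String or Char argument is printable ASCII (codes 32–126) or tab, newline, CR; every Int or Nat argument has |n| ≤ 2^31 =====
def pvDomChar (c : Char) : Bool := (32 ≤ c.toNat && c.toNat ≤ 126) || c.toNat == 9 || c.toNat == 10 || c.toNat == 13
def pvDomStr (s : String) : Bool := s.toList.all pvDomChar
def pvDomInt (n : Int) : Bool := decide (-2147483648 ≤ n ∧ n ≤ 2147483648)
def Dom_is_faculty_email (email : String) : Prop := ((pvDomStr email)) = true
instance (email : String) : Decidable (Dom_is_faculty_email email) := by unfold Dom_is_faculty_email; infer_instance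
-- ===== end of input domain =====

-- B replaces A's scan of all 28 faculty domains (equality-or-endswith each) by walking the
-- email domain's own dot-suffixes against a set, stopping at the first hit (objective: alternative).

-- shared module constant
def FACULTY_DOMAINS : List String :=
  ["fer.hr", "unizg.hr", "ffzg.hr", "efzg.hr", "pmf.hr", "agr.hr",
   "fzg.unizg.hr", "vet.hr", "grad.hr", "arhitekt.hr", "fizika.hr",
   "kemija.pmf.hr", "geof.pmf.hr", "geol.pmf.hr", "matf.hr", "fpz.hr",
   "fsb.hr", "fsreb.hr", "rgn.hr", "ktk.hr", "pfst.hr", "ttf.hr",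
   "uni-osijek.hr", "unist.hr", "uniri.hr", "unidu.hr", "unizd.hr",
   "unipu.hr"]

-- ===== PORT A =====
def is_faculty_email (email : String) : Bool :=
  -- if not email or '@' not in email: return False
  if email.toList.isEmpty || !(PySem.Str.isIn "@" email) then false
  else
    -- domain = email.lower().split('@')[1]
    let domain : List Char :=
      PySem.List.pyGetD (PySem.Chars.splitOn (PySem.Chars.lower email.toList) ['@']) 1 []
    -- for faculty_domain in FACULTY_DOMAINS: if domain == fd or domain.endswith('.' + fd): return True
    FACULTY_DOMAINS.any (fun fd =>
      domain == fd.toList || PySem.Chars.endswith domain ('.' :: fd.toList))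

-- ===== PORT B =====
def FACULTY_SET : PySem.Set (List Char) :=
  PySem.Set.ofList (FACULTY_DOMAINS.map String.toList)

-- while domain: if domain in FACULTY_SET: return True; _, _, domain = domain.partition('.')
-- str.partition('.')[2] is exact: the part after the first '.', or '' if there is no '.'
def afterDot (cs : List Char) : List Char := (cs.dropWhile (fun c => !(c == '.'))).tail

def bLoop (cs : List Char) : Bool :=
  if cs.isEmpty then false
  else if FACULTY_SET.contains cs then true
  else bLoop (afterDot cs)
termination_by cs.length
decreasing_by
  simp only [afterDot, List.length_tail]
  have h1 : (cs.dropWhile (fun c => !(c == '.'))).length ≤ cs.length := List.length_dropWhile_le _ _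
  have h3 : cs ≠ [] := by simp_all [List.isEmpty_iff]
  have h4 : 0 < cs.length := List.length_pos_iff.mpr h3
  omega

def is_faculty_email_alt (email : String) : Bool :=
  if email.toList.isEmpty || !(PySem.Str.isIn "@" email) then false
  else
    let domain : List Char :=
      PySem.List.pyGetD (PySem.Chars.splitOn (PySem.Chars.lower email.toList) ['@']) 1 []
    bLoop domain

-- ===== PRECONDITION & SPEC =====
def Spec_is_faculty_email (email : String) (out : Bool) : Prop := out = is_faculty_email_alt email
instance (email : String) (out : Bool) : Decidable (Spec_is_faculty_email email out) := by unfold Spec_is_faculty_email; infer_instance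

-- ===== CLAIM (what is proved, stated in full; the proofs are below) =====
def Claim_equal_is_faculty_email : Prop := ∀ (email : String), Dom_is_faculty_email email → Spec_is_faculty_email email (is_faculty_email email)

-- ===== LEMMAS AND PROOFS =====

-- the faculty list as char lists
def FDL : List (List Char) := FACULTY_DOMAINS.map String.toList

-- the "endswith" part of A's condition, as a Prop
def Esuf (cs : List Char) : Prop := ∃ fd ∈ FDL, ('.' :: fd) <:+ cs

lemma Esuf_nil : ¬ Esuf [] := by
  rintro ⟨fd, _, h⟩
  simpa using h.length_le

lemma Esuf_cons (c : Char) (cs : List Char) :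
    Esuf (c :: cs) ↔ (c = '.' ∧ cs ∈ FDL) ∨ Esuf cs := by
  constructor
  · rintro ⟨fd, hfd, hsuf⟩
    rcases List.suffix_cons_iff.mp hsuf with h | h
    · exact Or.inl ⟨(List.cons.injEq _ _ _ _ ▸ h).1.symm, by
        have := (List.cons.injEq _ _ _ _ ▸ h).2; exact this ▸ hfd⟩
    · exact Or.inr ⟨fd, hfd, h⟩
  · rintro (⟨rfl, hmem⟩ | ⟨fd, hfd, hsuf⟩)
    · exact ⟨cs, hmem, List.suffix_refl _⟩
    · exact ⟨fd, hfd, hsuf.trans (List.suffix_cons _ _)⟩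

-- no faculty domain is empty
lemma FDL_ne_nil : ([] : List Char) ∉ FDL := by decide

-- A's scan, characterized
lemma aAny_iff (cs : List Char) :
    (FACULTY_DOMAINS.any (fun fd =>
      cs == fd.toList || PySem.Chars.endswith cs ('.' :: fd.toList)) = true)
      ↔ cs ∈ FDL ∨ Esuf cs := by
  simp only [List.any_eq_true, Bool.or_eq_true, beq_iff_eq, PySem.Chars.endswith_iff,
    FDL, Esuf, List.mem_map]
  constructor
  · rintro ⟨fd, hfd, h | h⟩
    · exact Or.inl ⟨fd, hfd, h.symm⟩
    · exact Or.inr ⟨fd.toList, ⟨fd, hfd, rfl⟩, h⟩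
  · rintro (⟨fd, hfd, rfl⟩ | ⟨l, ⟨fd, hfd, rfl⟩, h⟩)
    · exact ⟨fd, hfd, Or.inl rfl⟩
    · exact ⟨fd, hfd, Or.inr h⟩

lemma mem_FACULTY_SET (cs : List Char) :
    FACULTY_SET.contains cs = true ↔ cs ∈ FDL :=
  (List.contains_iff_mem).trans (PySem.Set.mem_ofList _ _)

-- pushing Esuf through the dot-free prefix
lemma Esuf_append (p r : List Char) (hp : ∀ c ∈ p, c ≠ '.') :
    Esuf (p ++ '.' :: r) ↔ r ∈ FDL ∨ Esuf r := by
  induction p with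
  | nil => simpa using Esuf_cons '.' r
  | cons a p ih =>
    have ha : a ≠ '.' := hp a (List.mem_cons_self ..)
    rw [List.cons_append, Esuf_cons]
    simp only [ha, false_and, false_or]
    exact ih (fun c hc => hp c (List.mem_cons_of_mem _ hc))

-- B's loop, characterized
lemma bLoop_iff (cs : List Char) : bLoop cs = true ↔ cs ∈ FDL ∨ Esuf cs := by
  induction cs using bLoop.induct with
  | case1 cs h =>
    have h2 : cs = [] := List.isEmpty_iff.mp h
    subst h2
    rw [bLoop]
    simp [FDL_ne_nil, Esuf_nil]
  | case2 cs h hmem =>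
    rw [bLoop]
    simp only [h, Bool.false_eq_true, if_false, hmem, if_true, true_iff]
    exact Or.inl ((mem_FACULTY_SET cs).mp hmem)
  | case3 cs h hmem ih =>
    rw [bLoop]
    simp only [h, Bool.false_eq_true, if_false, hmem, if_false, ih]
    have hcs : cs ∉ FDL := fun hc => hmem ((mem_FACULTY_SET cs).mpr hc)
    have hsplit := (List.takeWhile_append_dropWhile (p := fun c => !(c == '.')) (l := cs)).symm
    have htw : ∀ x ∈ cs.takeWhile (fun c => !(c == '.')), x ≠ '.' := by
      intro x hx
      have := List.mem_takeWhile_imp hx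
      simpa using this
    rcases hd : cs.dropWhile (fun c => !(c == '.')) with _ | ⟨c, r⟩
    · -- no '.' in cs: Esuf cs is impossible
      rw [hd] at hsplit
      simp only [List.append_nil] at hsplit
      constructor
      · intro hcontra
        rw [afterDot, hd] at hcontra
        rcases hcontra with h' | h'
        · exact absurd h' FDL_ne_nil
        · exact absurd h' Esuf_nil
      · rintro (hc | ⟨fd, hfd, hsuf⟩)
        · exact absurd hc hcs
        · refine absurd (hsuf.subset (List.mem_cons_self ..)) ?_
          intro hmem'
          rw [hsplit] at hmem'
          exact htw '.' hmem' rfl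
    · -- cs = takeWhile ++ c :: r, with c = '.'
      have hc : c = '.' := by
        have hne : cs.dropWhile (fun c => !(c == '.')) ≠ [] := by simp [hd]
        have := List.head_dropWhile_not (p := fun c => !(c == '.')) (l := cs) hne
        simpa [hd] using this
      subst hc
      rw [hd] at hsplit
      rw [afterDot, hd, List.tail_cons]
      rw [hsplit, Esuf_append _ _ htw]
      have hcs' : cs.takeWhile (fun c => !(c == '.')) ++ '.' :: r ∉ FDL := hsplit ▸ hcs
      simp [hcs']

lemma loops_eq (cs : List Char) :
    FACULTY_DOMAINS.any (fun fd =>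
      cs == fd.toList || PySem.Chars.endswith cs ('.' :: fd.toList)) = bLoop cs := by
  rw [Bool.eq_iff_iff, aAny_iff, bLoop_iff]

-- ===== VERDICT (by name: the statement is the Claim_ definition above) =====
theorem is_faculty_email_spec : Claim_equal_is_faculty_email := by
  intro email _
  unfold Spec_is_faculty_email is_faculty_email is_faculty_email_alt
  split
  · rfl
  · exact loops_eq _
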